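-- pv_equiv track=rewrite | github.com/zslane/pymultics | multics/filesystem/sss/ioa_.py | _scan_case_block
-- ===== SOURCE A (Python) =====
-- def _NEXT(clist, n=1): return "".join(clist[:n])
--
-- def _scan_case_block(clist):
--     #== Scan the block-start token '^['
--     result_string  = clist.pop(0)
--     result_string += clist.pop(0)
--
--     s = _NEXT(clist, 2)
--     while clist and s != "^]":
--         if s == "^[":
--             result_string += _scan_case_block(clist)
--         else:
--             result_string += clist.pop(0)
--         # end if
--         s = _NEXT(clist, 2)
--     # end while
--
--     #== Scan the block-end token '^]'
--     if _NEXT(clist) == '^':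
--         result_string += clist.pop(0)
--         if _NEXT(clist) == ']':
--             result_string += clist.pop(0)
--
--     return result_string
-- ===== SOURCE B (Python) =====
-- def _scan_case_block(clist):
--     # Iterative rewrite: one loop with an explicit nesting-depth counter
--     # instead of recursion; consumes clist with pop(0) exactly like A.
--     result_string = clist.pop(0)
--     result_string += clist.pop(0)
--     depth = 1
--     while clist and depth:
--         s = "".join(clist[:2])
--         if s == "^[":
--             result_string += clist.pop(0)
--             result_string += clist.pop(0)
--             depth += 1
--         elif s == "^]":
--             if clist[0] == "^":
--                 result_string += clist.pop(0)
--                 result_string += clist.pop(0)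
--                 depth -= 1
--             else:
--                 # A's closing scan consumes nothing here and every
--                 # recursion level unwinds, so stop scanning.
--                 depth = 0
--         else:
--             result_string += clist.pop(0)
--     return result_string
-- ===== Notes on version B (the rewrite author's own statement) =====
-- stated objective: alternative
-- what changed: Replaces A's recursive descent (one call per nesting level, each with its own scan loop and closing-token epilogue) by a single iterative loop over the list with an explicit integer depth counter.
import Mathlib
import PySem

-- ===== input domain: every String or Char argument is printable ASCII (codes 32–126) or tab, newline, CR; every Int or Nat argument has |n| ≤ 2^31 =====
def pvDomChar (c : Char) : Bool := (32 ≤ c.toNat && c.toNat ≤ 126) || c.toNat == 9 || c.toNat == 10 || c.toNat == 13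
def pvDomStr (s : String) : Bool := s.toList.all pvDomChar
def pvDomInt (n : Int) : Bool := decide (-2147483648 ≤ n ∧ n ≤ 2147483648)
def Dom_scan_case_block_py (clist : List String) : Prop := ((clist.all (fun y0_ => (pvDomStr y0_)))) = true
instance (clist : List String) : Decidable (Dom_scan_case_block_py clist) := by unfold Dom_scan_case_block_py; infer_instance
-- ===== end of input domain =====

-- B replaces A's recursive descent by one iterative loop with an integer depth counter
-- (objective: alternative decomposition, same cost); both ports model pop(0) by
-- structurally consuming the list — the equivalence proved is about the RETURN value
-- (the Python versions also perform the same in-place consumption of clist).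

-- ===== PORT A =====
-- _NEXT(clist, n) = "".join(clist[:n])
def pvNextA (clist : List String) (n : Nat) : String := PySem.Str.join "" (clist.take n)

-- the block-end epilogue of _scan_case_block (the two guarded pops after the while loop)
def pvCloseA : String × List String → String × List String
  | (acc, cl) =>
    if pvNextA cl 1 = "^" then
      match cl with
      | c0 :: rest =>
        if pvNextA rest 1 = "]" then
          match rest with
          | c1 :: rest' => (acc ++ c0 ++ c1, rest')
          | [] => (acc ++ c0, rest)      -- unreachable: pvNextA [] 1 = "" ≠ "]"
        else (acc ++ c0, rest)
      | [] => (acc, cl)                  -- unreachable: pvNextA [] 1 = "" ≠ "^"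
    else (acc, cl)

-- _scan_case_block, with the mutated clist made explicit in the result and a Nat fuel
-- making the mutual recursion structural (fuel clist.length + 1 is never exhausted on
-- inputs satisfying Pre_; fuel 0 / missing elements model where Python raises IndexError).
mutual
def pvScanA : Nat → List String → String × List String
  | 0, cl => ("", cl)                    -- fuel exhausted (never happens under Pre_)
  | f + 1, cl =>
    match cl with
    | c0 :: c1 :: rest => pvCloseA (pvLoopA f (c0 ++ c1) rest)
    | _ => ("", cl)                      -- IndexError on the two opening pops (outside Pre_)

def pvLoopA : Nat → String → List String → String × List String
  | 0, acc, cl => (acc, cl)              -- fuel exhausted (never happens under Pre_)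
  | f + 1, acc, cl =>
    if cl ≠ [] ∧ pvNextA cl 2 ≠ "^]" then
      if pvNextA cl 2 = "^[" then
        let p := pvScanA f cl
        pvLoopA f (acc ++ p.1) p.2
      else
        match cl with
        | c :: rest => pvLoopA f (acc ++ c) rest
        | [] => (acc, cl)                -- unreachable: cl ≠ []
    else (acc, cl)
end

def scan_case_block_py (clist : List String) : String :=
  (pvScanA (clist.length + 1) clist).1

-- ===== PORT B =====
-- the single while loop of B: explicit depth counter, no recursion into the block
def pvLoopB : List String → Int → String → String
  | [], _, acc => acc
  | c0 :: rest, d, acc =>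
    if d = 0 then acc
    else
      let s := PySem.Str.join "" ((c0 :: rest).take 2)
      if s = "^[" then
        match rest with
        | c1 :: rest' => pvLoopB rest' (d + 1) (acc ++ c0 ++ c1)
        | [] => acc                      -- IndexError (outside Pre_)
      else if s = "^]" then
        if c0 = "^" then
          match rest with
          | c1 :: rest' => pvLoopB rest' (d - 1) (acc ++ c0 ++ c1)
          | [] => acc                    -- unreachable: "^" ≠ "^]"
        else acc                         -- depth := 0, loop ends
      else pvLoopB rest d (acc ++ c0)
termination_by cl _ _ => cl.length
decreasing_by all_goals simp only [List.length_cons]; omega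

def scan_case_block_py_alt (clist : List String) : String :=
  match clist with
  | c0 :: c1 :: rest => pvLoopB rest 1 (c0 ++ c1)
  | _ => ""                              -- IndexError on the two opening pops (outside Pre_)

-- ===== PRECONDITION & SPEC =====
-- A raises IndexError exactly on lists with fewer than two elements (the two
-- unconditional opening pops) and on lists where the scan's cursor reaches a lone
-- trailing "^[" element with an open block (the recursive call's second opening pop);
-- B raises at exactly the same inputs.  Whether the cursor reaches that point is a
-- property of the parse itself, so it is stated by the minimal consumption automaton
-- pvScanRaises: it tracks only the cursor and the nesting depth, builds no output,
-- and is neither port.  Pre_ excludes no input on which A returns.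
def pvScanRaises : List String → Int → Bool
  | [], _ => false
  | [c0], d =>                            -- one element left: raise iff it is a lone "^["
    if d ≤ 0 then false
    else if PySem.Str.join "" [c0] = "^[" then true else false
  | c0 :: c1 :: rest, d =>
    if d ≤ 0 then false
    else
      let s := PySem.Str.join "" [c0, c1]
      if s = "^[" then pvScanRaises rest (d + 1)
      else if s = "^]" then
        if c0 = "^" then pvScanRaises rest (d - 1) else false
      else pvScanRaises (c1 :: rest) d

def Pre_scan_case_block_py (clist : List String) : Prop :=
  2 ≤ clist.length ∧ pvScanRaises (clist.drop 2) 1 = false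
instance (clist : List String) : Decidable (Pre_scan_case_block_py clist) := by
  unfold Pre_scan_case_block_py; infer_instance

def pvWitness_scan_case_block_py : List String := ["^", "[", "a", "^", "]"]

def Spec_scan_case_block_py (clist : List String) (out : String) : Prop :=
  out = scan_case_block_py_alt clist
instance (clist : List String) (out : String) : Decidable (Spec_scan_case_block_py clist out) := by
  unfold Spec_scan_case_block_py; infer_instance

-- ===== CLAIM (what is proved, stated in full; the proofs are below) =====
def Claim_equal_scan_case_block_py : Prop :=
  ∀ (clist : List String), Dom_scan_case_block_py clist →
    Pre_scan_case_block_py clist →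
    Spec_scan_case_block_py clist (scan_case_block_py clist)

-- ===== LEMMAS AND PROOFS =====

-- A's loop has stopped on a closing token whose first element is not "^": the closing
-- epilogue consumes nothing and every recursion level of A unwinds
def pvStuck (cl : List String) : Bool := pvNextA cl 2 == "^]" && !(pvNextA cl 1 == "^")

theorem pvNextA_nil (n : Nat) : pvNextA [] n = "" := by
  simp [pvNextA, PySem.Str.join, PySem.Chars.join, List.intercalate]
theorem pvNextA_one (a : String) (l : List String) : pvNextA (a :: l) 1 = a := by
  simp [pvNextA, PySem.Str.join, PySem.Chars.join, List.intercalate]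
theorem pvNextA_two_one (a : String) : pvNextA [a] 2 = a := by
  simp [pvNextA, PySem.Str.join, PySem.Chars.join, List.intercalate]
theorem pvNextA_two (a b : String) (l : List String) : pvNextA (a :: b :: l) 2 = a ++ b := by
  simp [pvNextA, PySem.Str.join, PySem.Chars.join, List.intercalate]

-- "^" ++ b = "^]" forces b = "]"
theorem pvAppend_hat {b : String} (h : ("^" : String) ++ b = "^]") : b = "]" := by
  have h3 := congrArg String.toList h
  simp only [String.toList_append] at h3
  have h4 : b.toList = [']'] := by simpa using h3
  have h5 := congrArg String.ofList h4
  simpa using h5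

-- one-step unfolding equations for the fuel recursions
theorem pvLoopA_zero (acc : String) (cl : List String) : pvLoopA 0 acc cl = (acc, cl) := by
  rw [pvLoopA.eq_def]
theorem pvLoopA_succ (f : Nat) (acc : String) (cl : List String) :
    pvLoopA (f + 1) acc cl =
      if cl ≠ [] ∧ pvNextA cl 2 ≠ "^]" then
        if pvNextA cl 2 = "^[" then
          pvLoopA f (acc ++ (pvScanA f cl).1) (pvScanA f cl).2
        else
          match cl with
          | c :: rest => pvLoopA f (acc ++ c) rest
          | [] => (acc, cl)
      else (acc, cl) := by
  rw [pvLoopA.eq_def]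
theorem pvScanA_cc (f : Nat) (c0 c1 : String) (rest : List String) :
    pvScanA (f + 1) (c0 :: c1 :: rest) = pvCloseA (pvLoopA f (c0 ++ c1) rest) := by
  rw [pvScanA.eq_def]
theorem pvLoopB_nil (d : Int) (acc : String) : pvLoopB [] d acc = acc := by
  unfold pvLoopB; rfl
theorem pvLoopB_cons (c0 : String) (rest : List String) (d : Int) (acc : String) :
    pvLoopB (c0 :: rest) d acc =
      if d = 0 then acc
      else if pvNextA (c0 :: rest) 2 = "^[" then
        match rest with
        | c1 :: rest' => pvLoopB rest' (d + 1) (acc ++ c0 ++ c1)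
        | [] => acc
      else if pvNextA (c0 :: rest) 2 = "^]" then
        if c0 = "^" then
          match rest with
          | c1 :: rest' => pvLoopB rest' (d - 1) (acc ++ c0 ++ c1)
          | [] => acc
        else acc
      else pvLoopB rest d (acc ++ c0) := by
  rw [pvLoopB.eq_def]; rfl
theorem pvJoin_one (a : String) : PySem.Str.join "" [a] = a := by
  simp [PySem.Str.join, PySem.Chars.join, List.intercalate]
theorem pvJoin_two (a b : String) : PySem.Str.join "" [a, b] = a ++ b := by
  simp [PySem.Str.join, PySem.Chars.join, List.intercalate]
theorem pvScanRaises_nil (d : Int) : pvScanRaises [] d = false := rfl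
theorem pvScanRaises_cons (c0 : String) (rest : List String) (d : Int) :
    pvScanRaises (c0 :: rest) d =
      if d ≤ 0 then false
      else if pvNextA (c0 :: rest) 2 = "^[" then
        match rest with
        | [] => true
        | _ :: rest' => pvScanRaises rest' (d + 1)
      else if pvNextA (c0 :: rest) 2 = "^]" then
        if c0 = "^" then
          match rest with
          | [] => false
          | _ :: rest' => pvScanRaises rest' (d - 1)
        else false
      else pvScanRaises rest d := by
  cases rest with
  | nil =>
    show (if d ≤ 0 then false
        else if PySem.Str.join "" [c0] = "^[" then true else false) = _
    rw [pvJoin_one, pvNextA_two_one]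
    by_cases hd : d ≤ 0
    · simp [hd]
    · by_cases h1 : c0 = "^["
      · simp [hd, h1]
      · by_cases h2 : c0 = "^]"
        · have h3 : ¬ c0 = "^" := by rw [h2]; decide
          simp [hd, h2]
        · simp [hd, h1, h2, pvScanRaises_nil]
  | cons c1 rest' =>
    show (if d ≤ 0 then false
        else
          if PySem.Str.join "" [c0, c1] = "^[" then pvScanRaises rest' (d + 1)
          else if PySem.Str.join "" [c0, c1] = "^]" then
            if c0 = "^" then pvScanRaises rest' (d - 1) else false
          else pvScanRaises (c1 :: rest') d) = _
    rw [pvJoin_two, pvNextA_two]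

theorem pvLoopB_zero (cl : List String) (acc : String) : pvLoopB cl 0 acc = acc := by
  cases cl with
  | nil => exact pvLoopB_nil 0 acc
  | cons c r => rw [pvLoopB_cons]; simp

-- accumulator homomorphism for the closing epilogue
theorem pvCloseA_acc (a b : String) (cl : List String) :
    pvCloseA (a ++ b, cl) = (a ++ (pvCloseA (b, cl)).1, (pvCloseA (b, cl)).2) := by
  unfold pvCloseA
  dsimp only
  cases cl with
  | nil => simp
  | cons c0 rest =>
    cases rest with
    | nil =>
      by_cases hA : pvNextA [c0] 1 = "^" <;> simp [hA, pvNextA_nil, String.append_assoc]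
    | cons c1 rest' =>
      by_cases hA : pvNextA (c0 :: c1 :: rest') 1 = "^" <;>
        by_cases hB : pvNextA (c1 :: rest') 1 = "]" <;>
          simp [hA, hB, String.append_assoc]

-- accumulator homomorphism for A's loop
theorem pvLoopA_acc : ∀ (f : Nat) (a b : String) (cl : List String),
    pvLoopA f (a ++ b) cl = (a ++ (pvLoopA f b cl).1, (pvLoopA f b cl).2) := by
  intro f
  induction f with
  | zero => intro a b cl; simp [pvLoopA_zero]
  | succ f ih =>
    intro a b cl
    rw [pvLoopA_succ, pvLoopA_succ f b cl]
    by_cases h1 : cl ≠ [] ∧ pvNextA cl 2 ≠ "^]"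
    · rw [if_pos h1, if_pos h1]
      by_cases h2 : pvNextA cl 2 = "^["
      · rw [if_pos h2, if_pos h2, String.append_assoc, ih]
      · rw [if_neg h2, if_neg h2]
        cases cl with
        | nil => simp
        | cons c rest => show pvLoopA f (a ++ b ++ c) rest = _; rw [String.append_assoc, ih]
    · rw [if_neg h1, if_neg h1]

-- the remaining list is always a suffix of the list scanned
theorem pvCloseA_suffix (p : String × List String) : (pvCloseA p).2 <:+ p.2 := by
  obtain ⟨acc, cl⟩ := p
  unfold pvCloseA
  dsimp only
  cases cl with
  | nil => simp
  | cons c0 rest =>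
    cases rest with
    | nil => by_cases hA : pvNextA [c0] 1 = "^" <;> simp [hA, List.suffix_cons]
    | cons c1 rest' =>
      by_cases hA : pvNextA (c0 :: c1 :: rest') 1 = "^" <;>
        by_cases hB : pvNextA (c1 :: rest') 1 = "]" <;> simp [hA, hB]
      exact (List.suffix_cons c1 rest').trans (List.suffix_cons c0 _)

theorem pvA_suffix : ∀ (f : Nat),
    (∀ acc cl, (pvLoopA f acc cl).2 <:+ cl) ∧ (∀ cl, (pvScanA f cl).2 <:+ cl) := by
  intro f
  induction f with
  | zero =>
    constructor
    · intro acc cl; rw [pvLoopA_zero]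
    · intro cl; rw [pvScanA.eq_def]
  | succ f ih =>
    constructor
    · intro acc cl
      rw [pvLoopA_succ]
      by_cases h1 : cl ≠ [] ∧ pvNextA cl 2 ≠ "^]"
      · rw [if_pos h1]
        by_cases h2 : pvNextA cl 2 = "^["
        · rw [if_pos h2]
          exact (ih.1 _ _).trans (ih.2 cl)
        · rw [if_neg h2]
          cases cl with
          | nil => exact List.suffix_refl _
          | cons c rest =>
            show (pvLoopA f (acc ++ c) rest).2 <:+ c :: rest
            exact (ih.1 _ _).trans (List.suffix_cons c rest)
      · rw [if_neg h1]
    · intro cl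
      match cl with
      | [] => rw [pvScanA.eq_def]
      | [c0] => rw [pvScanA.eq_def]
      | c0 :: c1 :: rest =>
        rw [pvScanA_cc]
        exact (pvCloseA_suffix _).trans
          ((ih.1 _ _).trans ((List.suffix_cons c1 rest).trans (List.suffix_cons c0 _)))

-- B at depth d+1 runs exactly one A level (loop plus closing epilogue) and continues at
-- depth d, unless the level ended on a closing token it could not consume (then every
-- A level unwinds and B stops too); the no-raise automaton condition is carried along
theorem pvKey : ∀ (f : Nat) (cl : List String) (acc : String) (d : Int),
    cl.length ≤ f → pvScanRaises cl (d + 1) = false → 0 ≤ d →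
    (pvLoopB cl (d + 1) acc =
      (if pvStuck (pvLoopA f acc cl).2
       then (pvCloseA (pvLoopA f acc cl)).1
       else pvLoopB (pvCloseA (pvLoopA f acc cl)).2 d (pvCloseA (pvLoopA f acc cl)).1)) ∧
    (pvStuck (pvLoopA f acc cl).2 = false →
      pvScanRaises (pvCloseA (pvLoopA f acc cl)).2 d = false) := by
  intro f
  induction f using Nat.strong_induction_on with
  | _ f ih =>
  intro cl acc d hlen hraise hd
  have hd1 : ¬ (d + 1 = 0) := by omega
  cases cl with
  | nil =>
    have hA : pvLoopA f acc [] = (acc, []) := by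
      cases f with
      | zero => exact pvLoopA_zero acc []
      | succ f => rw [pvLoopA_succ]; simp
    have hC : pvCloseA (acc, ([] : List String)) = (acc, []) := by
      unfold pvCloseA
      dsimp only
      rw [pvNextA_nil]
      simp only [if_neg (by decide : ¬ ("" : String) = "^")]
    have hSt : pvStuck ([] : List String) = false := by simp [pvStuck, pvNextA_nil]
    constructor
    · rw [hA, pvLoopB_nil, hSt]
      simp only [Bool.false_eq_true, if_false]
      rw [hC]
      dsimp only
      rw [pvLoopB_nil]
    · intro _
      rw [hA, hC]
      exact pvScanRaises_nil d
  | cons c0 rest =>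
    obtain ⟨f, rfl⟩ : ∃ f', f = f' + 1 := by
      cases f with
      | zero => simp at hlen
      | succ f => exact ⟨f, rfl⟩
    rw [pvScanRaises_cons, if_neg (by omega : ¬ d + 1 ≤ 0)] at hraise
    by_cases hbr : pvNextA (c0 :: rest) 2 = "^["
    · rw [if_pos hbr] at hraise
      cases rest with
      | nil => exact absurd hraise (by simp)
      | cons c1 rest2 =>
        -- A recurses into the nested block; B pops the opening pair and raises the depth
        obtain ⟨f, rfl⟩ : ∃ f', f = f' + 1 := by
          cases f with
          | zero => exfalso; simp at hlen
          | succ f => exact ⟨f, rfl⟩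
        have hraise2 : pvScanRaises rest2 (d + 1 + 1) = false := hraise
        have hlen2 : rest2.length ≤ f := by simp at hlen; omega
        have hq := pvLoopA_acc f acc (c0 ++ c1) rest2
        set q := pvLoopA f (c0 ++ c1) rest2 with hqdef
        set P := pvCloseA q with hPdef
        have hIH := ih f (by omega) rest2 (acc ++ c0 ++ c1) (d + 1) hlen2 hraise2 (by omega)
        have hIHlevel := hIH.1
        rw [show acc ++ c0 ++ c1 = acc ++ (c0 ++ c1) from String.append_assoc, hq,
          pvCloseA_acc, Prod.mk.eta] at hIHlevel
        have hIHinv := hIH.2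
        rw [show acc ++ c0 ++ c1 = acc ++ (c0 ++ c1) from String.append_assoc, hq,
          pvCloseA_acc, Prod.mk.eta] at hIHinv
        have hcond : (c0 :: c1 :: rest2) ≠ [] ∧ pvNextA (c0 :: c1 :: rest2) 2 ≠ "^]" :=
          ⟨by simp, by rw [hbr]; decide⟩
        have hsufP : P.2 <:+ rest2 := (pvCloseA_suffix q).trans ((pvA_suffix f).1 _ _)
        by_cases hstuck : pvStuck q.2 = true
        · -- the nested level got stuck: A's outer loop exits at once and unwinds too
          have hst := hstuck
          unfold pvStuck at hst
          rw [Bool.and_eq_true] at hst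
          have h2 : pvNextA q.2 2 = "^]" := by simpa using hst.1
          have h1 : pvNextA q.2 1 ≠ "^" := by simpa using hst.2
          have hclose : P = (q.1, q.2) := by
            rw [hPdef]
            unfold pvCloseA
            dsimp only
            cases h : q.2 with
            | nil => simp
            | cons x xs =>
              rw [h, pvNextA_one] at h1
              simp only [pvNextA_one, if_neg h1]
          have hA2 : pvLoopA (f + 1) (acc ++ P.1) P.2 = (acc ++ P.1, P.2) := by
            rw [pvLoopA_succ, if_neg (by rw [hclose]; simp [h2])]
          have hG : pvStuck (acc ++ P.1, P.2).2 = true := by rw [hclose]; exact hstuck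
          have hC2 : pvCloseA (acc ++ P.1, P.2) = (acc ++ P.1, P.2) := by
            unfold pvCloseA
            dsimp only
            cases h : P.2 with
            | nil => simp
            | cons x xs =>
              rw [hclose] at h
              rw [h, pvNextA_one] at h1
              simp only [pvNextA_one, if_neg h1]
          constructor
          · rw [pvLoopB_cons, if_neg hd1]
            rw [if_pos hbr]
            show pvLoopB rest2 (d + 1 + 1) (acc ++ c0 ++ c1) = _
            rw [show acc ++ c0 ++ c1 = acc ++ (c0 ++ c1) from String.append_assoc]
            rw [hIHlevel, if_pos hstuck]
            rw [pvLoopA_succ (f + 1) acc, if_pos hcond, if_pos hbr, pvScanA_cc, ← hqdef,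
              ← hPdef, hA2, if_pos hG, hC2]
          · intro houter
            rw [pvLoopA_succ (f + 1) acc, if_pos hcond, if_pos hbr, pvScanA_cc, ← hqdef,
              ← hPdef, hA2, hG] at houter
            exact absurd houter (by simp)
        · -- the nested level closed normally: B continues at depth d+1, A's outer loop goes on
          have hstuckf : pvStuck q.2 = false := Bool.eq_false_iff.mpr (fun h => hstuck h)
          have hraiseP : pvScanRaises P.2 (d + 1) = false := hIHinv hstuckf
          have hlenP : P.2.length ≤ f + 1 := le_trans hsufP.length_le (by omega)
          have hcont := ih (f + 1) (by omega) P.2 (acc ++ P.1) d hlenP hraiseP hd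
          constructor
          · rw [pvLoopB_cons, if_neg hd1]
            rw [if_pos hbr]
            show pvLoopB rest2 (d + 1 + 1) (acc ++ c0 ++ c1) = _
            rw [show acc ++ c0 ++ c1 = acc ++ (c0 ++ c1) from String.append_assoc]
            rw [hIHlevel, if_neg hstuck]
            rw [pvLoopA_succ (f + 1) acc, if_pos hcond, if_pos hbr, pvScanA_cc, ← hqdef,
              ← hPdef]
            exact hcont.1
          · intro houter
            rw [pvLoopA_succ (f + 1) acc, if_pos hcond, if_pos hbr, pvScanA_cc, ← hqdef,
              ← hPdef] at houter ⊢
            exact hcont.2 houter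
    · rw [if_neg hbr] at hraise
      by_cases hcl : pvNextA (c0 :: rest) 2 = "^]"
      · rw [if_pos hcl] at hraise
        -- closing token seen: A's loop exits here and runs the closing epilogue
        have hA : pvLoopA (f + 1) acc (c0 :: rest) = (acc, c0 :: rest) := by
          rw [pvLoopA_succ, if_neg (by simp [hcl])]
        by_cases hhat : c0 = "^"
        · rw [if_pos hhat] at hraise
          cases rest with
          | nil =>
            exfalso
            rw [pvNextA_two_one] at hcl
            rw [hhat] at hcl
            exact absurd hcl (by decide)
          | cons c1 rest' =>
            rw [pvNextA_two] at hcl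
            have hc1 : c1 = "]" := pvAppend_hat (by rw [← hhat]; exact hcl)
            have hSt : pvStuck (c0 :: c1 :: rest') = false := by
              simp [pvStuck, pvNextA_one, hhat]
            have hC : pvCloseA (acc, c0 :: c1 :: rest') = (acc ++ c0 ++ c1, rest') := by
              unfold pvCloseA
              dsimp only
              simp only [pvNextA_one, if_pos hhat, if_pos hc1]
            constructor
            · rw [pvLoopB_cons, if_neg hd1]
              rw [if_neg hbr, if_pos (by rw [pvNextA_two, hcl]), if_pos hhat]
              show pvLoopB rest' (d + 1 - 1) (acc ++ c0 ++ c1) = _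
              rw [hA, hSt]
              simp only [Bool.false_eq_true, if_false]
              rw [hC]
              dsimp only
              rw [show d + 1 - 1 = d from by omega]
            · intro _
              rw [hA, hC]
              show pvScanRaises rest' d = false
              have : pvScanRaises rest' (d + 1 - 1) = false := hraise
              rwa [show d + 1 - 1 = d from by omega] at this
        · rw [if_neg hhat] at hraise
          have hSt : pvStuck (c0 :: rest) = true := by
            simp [pvStuck, pvNextA_one, hcl, hhat]
          have hC : pvCloseA (acc, c0 :: rest) = (acc, c0 :: rest) := by
            unfold pvCloseA
            dsimp only
            simp only [pvNextA_one, if_neg hhat]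
          constructor
          · rw [pvLoopB_cons, if_neg hd1]
            rw [if_neg hbr, if_pos hcl, if_neg hhat]
            rw [hA, hSt]
            simp only [if_true]
            rw [hC]
          · intro houter
            rw [hA, hSt] at houter
            exact absurd houter (by simp)
      · rw [if_neg hcl] at hraise
        -- ordinary character: both sides pop one element and go on
        have hA : pvLoopA (f + 1) acc (c0 :: rest) = pvLoopA f (acc ++ c0) rest := by
          rw [pvLoopA_succ, if_pos ⟨by simp, hcl⟩, if_neg hbr]
        have hcont := ih f (by omega) rest (acc ++ c0) d (by simp at hlen; omega) hraise hd
        constructor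
        · rw [pvLoopB_cons, if_neg hd1]
          rw [if_neg hbr, if_neg hcl, hA]
          exact hcont.1
        · intro houter
          rw [hA] at houter ⊢
          exact hcont.2 houter

-- ===== VERDICT (by name: the statement is the Claim_ definition above) =====
theorem scan_case_block_py_spec : Claim_equal_scan_case_block_py := by
  intro clist _hdom hpre
  obtain ⟨hlen, hraise⟩ := hpre
  unfold Spec_scan_case_block_py
  match clist, hlen with
  | c0 :: c1 :: rest, _ =>
    have hraise' : pvScanRaises rest (0 + 1) = false := by
      simpa using hraise
    have hk := (pvKey (rest.length + 2) rest (c0 ++ c1) 0 (by omega) hraise' le_rfl).1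
    unfold scan_case_block_py scan_case_block_py_alt
    simp only [List.length_cons]
    show (pvScanA (rest.length + 1 + 1 + 1) (c0 :: c1 :: rest)).1
        = pvLoopB rest 1 (c0 ++ c1)
    rw [show rest.length + 1 + 1 + 1 = (rest.length + 2) + 1 from by omega]
    rw [pvScanA]
    rw [show (1 : Int) = 0 + 1 from by norm_num, hk]
    split
    · rfl
    · rw [pvLoopB_zero]
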